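-- pv_equiv track=rewrite | github.com/keks-24/hillel_python | tests/test_hw_descrp.py | encrypt_func
-- ===== SOURCE A (Python) =====
-- def encrypt_func(input_string):
-- 	"""function that encrypts a given input by two steps, reverse word and replace in it letters"""
--
-- 	reverse_input_string = reversed(input_string)
-- 	cart_dict = {"a":0, "e":1, "i":2, "o":2, "u": 3}
-- 	final_word = str()
-- 	for letter in reverse_input_string:
-- 		if letter in cart_dict.keys():
-- 			final_word += str(cart_dict[letter])
-- 		else:
-- 			final_word += str(letter)
-- 	return final_word
-- ===== SOURCE B (Python) =====
-- def encrypt_func(input_string):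
-- 	"""function that encrypts a given input by two steps, reverse word and replace in it letters"""
-- 	cart = {"a": "0", "e": "1", "i": "2", "o": "2", "u": "3"}
--
-- 	def enc(lo, hi):
-- 		# encrypt input_string[lo:hi] by divide and conquer: the reversal
-- 		# falls out of concatenating the two halves in swapped order
-- 		if hi - lo == 0:
-- 			return ""
-- 		if hi - lo == 1:
-- 			s = input_string[lo]
-- 			return cart.get(s, s)
-- 		mid = (lo + hi) // 2
-- 		return enc(mid, hi) + enc(lo, mid)
--
-- 	return enc(0, len(input_string))
-- ===== Notes on version B (the rewrite author's own statement) =====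
-- stated objective: alternative
-- what changed: Replaces the linear reversed-iteration loop with += accumulation by a divide-and-conquer recursion over index ranges that concatenates the encrypted halves in swapped order (reversal emerges from the recursion) and maps single characters through a dict.get with default.
import Mathlib
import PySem

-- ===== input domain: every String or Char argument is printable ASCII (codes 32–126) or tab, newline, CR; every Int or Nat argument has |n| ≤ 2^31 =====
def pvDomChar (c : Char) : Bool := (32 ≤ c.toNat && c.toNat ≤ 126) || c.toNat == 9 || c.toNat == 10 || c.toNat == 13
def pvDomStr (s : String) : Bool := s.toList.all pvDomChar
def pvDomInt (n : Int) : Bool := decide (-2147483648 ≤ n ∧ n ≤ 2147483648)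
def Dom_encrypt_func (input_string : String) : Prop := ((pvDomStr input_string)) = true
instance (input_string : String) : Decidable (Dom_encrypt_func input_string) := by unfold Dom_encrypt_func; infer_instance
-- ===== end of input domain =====

-- B replaces A's reversed-iteration loop with += accumulation by a divide-and-conquer
-- recursion over index ranges that concatenates the encrypted halves in swapped order
-- (alternative decomposition; the reversal emerges from the recursion).

-- ===== PORT A =====
def encrypt_func (input_string : String) : String :=
  (input_string.toList.reverse).foldl
    (fun final_word letter =>
      if letter = 'a' then final_word ++ "0"
      else if letter = 'e' then final_word ++ "1"
      else if letter = 'i' then final_word ++ "2"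
      else if letter = 'o' then final_word ++ "2"
      else if letter = 'u' then final_word ++ "3"
      else final_word ++ String.ofList [letter]) ""

-- ===== PORT B =====
-- cart = {"a": "0", "e": "1", "i": "2", "o": "2", "u": "3"}
def pvCart : PySem.Dict String String :=
  PySem.Dict.ofList [("a", "0"), ("e", "1"), ("i", "2"), ("o", "2"), ("u", "3")]

-- enc(lo, hi), B's inner recursion; lo, hi are natural indices here (B only calls enc
-- with 0 ≤ lo ≤ hi ≤ len, where Python's // 2 agrees with Nat division and
-- input_string[lo] is plain in-range indexing; the 'none' arm is unreachable for B's calls)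
def pvEnc (chars : List Char) (lo hi : Nat) : String :=
  if hi - lo = 0 then ""
  else if hi - lo = 1 then
    match chars[lo]? with
    | some c => let s := String.ofList [c]; PySem.Dict.getD pvCart s s
    | none => ""
  else
    let mid := (lo + hi) / 2
    pvEnc chars mid hi ++ pvEnc chars lo mid
termination_by hi - lo
decreasing_by all_goals omega

def encrypt_func_alt (input_string : String) : String :=
  pvEnc input_string.toList 0 input_string.toList.length

-- ===== PRECONDITION & SPEC =====
def Spec_encrypt_func (input_string : String) (out : String) : Prop := out = encrypt_func_alt input_string
instance (input_string : String) (out : String) : Decidable (Spec_encrypt_func input_string out) := by unfold Spec_encrypt_func; infer_instance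

-- ===== CLAIM (what is proved, stated in full; the proofs are below) =====
def Claim_equal_encrypt_func : Prop := ∀ (input_string : String), Dom_encrypt_func input_string → Spec_encrypt_func input_string (encrypt_func input_string)

-- ===== LEMMAS AND PROOFS =====

-- the character map both programs realise
def pvTr (c : Char) : Char :=
  if c = 'a' then '0'
  else if c = 'e' then '1'
  else if c = 'i' then '2'
  else if c = 'o' then '2'
  else if c = 'u' then '3'
  else c

-- A's loop body appends exactly the single translated character
theorem pv_body_eq (acc : String) (c : Char) :
    (if c = 'a' then acc ++ "0"
      else if c = 'e' then acc ++ "1"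
      else if c = 'i' then acc ++ "2"
      else if c = 'o' then acc ++ "2"
      else if c = 'u' then acc ++ "3"
      else acc ++ String.ofList [c]) = acc ++ String.ofList [pvTr c] := by
  unfold pvTr
  split_ifs <;> rfl

-- A's loop concatenates the translated characters in traversal order
theorem pv_foldl_eq (l : List Char) (acc : String) :
    l.foldl
      (fun final_word letter =>
        if letter = 'a' then final_word ++ "0"
        else if letter = 'e' then final_word ++ "1"
        else if letter = 'i' then final_word ++ "2"
        else if letter = 'o' then final_word ++ "2"
        else if letter = 'u' then final_word ++ "3"
        else final_word ++ String.ofList [letter]) acc = acc ++ String.ofList (l.map pvTr) := by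
  induction l generalizing acc with
  | nil => simp
  | cons c t ih =>
    rw [List.foldl_cons]
    show List.foldl _ (if c = 'a' then acc ++ "0" else _) t = _
    rw [pv_body_eq, ih]
    apply String.toList_injective
    simp

-- singleton strings of distinct characters are distinct (for the dict-lookup fallthrough)
theorem pv_ne_lit (c d : Char) (h : c ≠ d) : (String.ofList [d] == String.ofList [c]) = false := by
  simp only [beq_eq_false_iff_ne, ne_eq]
  intro hh
  have h2 := congrArg String.toList hh
  simp at h2
  exact h h2.symm

-- B's dict lookup with default is the same character map
theorem pv_getD_eq (c : Char) :
    PySem.Dict.getD pvCart (String.ofList [c]) (String.ofList [c]) = String.ofList [pvTr c] := by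
  by_cases ha : c = 'a'
  · subst ha; decide
  · by_cases he : c = 'e'
    · subst he; decide
    · by_cases hi : c = 'i'
      · subst hi; decide
      · by_cases ho : c = 'o'
        · subst ho; decide
        · by_cases hu : c = 'u'
          · subst hu; decide
          · have ht : pvTr c = c := by simp [pvTr, ha, he, hi, ho, hu]
            have hd : pvCart = PySem.Dict.mk [("a","0"),("e","1"),("i","2"),("o","2"),("u","3")] := by decide
            have h1 := pv_ne_lit c 'a' ha
            have h2 := pv_ne_lit c 'e' he
            have h3 := pv_ne_lit c 'i' hi
            have h4 := pv_ne_lit c 'o' ho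
            have h5 := pv_ne_lit c 'u' hu
            rw [ht, hd]
            simp only [PySem.Dict.getD, PySem.Dict.get?_mk_cons]
            norm_num [show ("a" : String) = String.ofList ['a'] from rfl,
              show ("e" : String) = String.ofList ['e'] from rfl,
              show ("i" : String) = String.ofList ['i'] from rfl,
              show ("o" : String) = String.ofList ['o'] from rfl,
              show ("u" : String) = String.ofList ['u'] from rfl,
              h1, h2, h3, h4, h5, PySem.Dict.get?]

-- B's recursion computes the reversed translated segment input_string[lo:hi]
theorem pv_enc_eq (l : List Char) (lo hi : Nat) :
    hi ≤ l.length → pvEnc l lo hi = String.ofList (((l.drop lo).take (hi - lo)).map pvTr).reverse := by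
  fun_induction pvEnc l lo hi with
  | case1 lo hi h0 =>
    intro _; rw [h0]
    simp only [List.take_zero, List.map_nil, List.reverse_nil]
  | case2 lo hi h0 h1 c hc =>
    intro hhi
    obtain ⟨hlo, hceq⟩ := List.getElem?_eq_some_iff.mp hc
    rw [h1, List.drop_eq_getElem_cons hlo, hceq]
    simpa using pv_getD_eq c
  | case3 lo hi h0 h1 hc =>
    intro hhi
    rw [List.getElem?_eq_none_iff] at hc
    omega
  | case4 lo hi h0 h1 mid ihA ihB =>
    intro hhi
    have hmid : mid = (lo + hi) / 2 := rfl
    have hm1 : mid ≤ l.length := by omega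
    rw [ihA hhi, ihB hm1]
    apply String.toList_injective
    simp only [String.toList_append, String.toList_ofList]
    rw [← List.reverse_append, ← List.map_append]
    congr 2
    have hlen : hi - lo = (mid - lo) + (hi - mid) := by omega
    rw [hlen, List.take_add, List.drop_drop]
    have hml : lo + (mid - lo) = mid := by omega
    rw [hml]

-- ===== VERDICT (by name: the statement is the Claim_ definition above) =====
theorem encrypt_func_spec : Claim_equal_encrypt_func := by
  intro s _
  show _ = _
  unfold encrypt_func encrypt_func_alt
  rw [pv_foldl_eq, pv_enc_eq _ 0 _ (le_refl _)]
  apply String.toList_injective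
  simp
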